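-- pv_equiv track=rewrite | github.com/kimbap1001/CodingTest | 백준/Silver/3986. 좋은 단어/좋은 단어.py | solve
-- ===== SOURCE A (Python) =====
-- def solve(words:list)->int:
--     result=0
--     for word in words:
--         stack=[]
--         for alpha in word:
--             if stack and stack[-1]==alpha:
--                 stack.pop()
--             else:
--                 stack.append(alpha)
--         if not stack:
--             result+=1
--
--     return result
-- ===== SOURCE B (Python) =====
-- def solve(words: list) -> int:
--     result = 0
--     for word in words:
--         w = word
--         while True:
--             for i in range(len(w) - 1):
--                 if w[i] == w[i + 1]:
--                     w = w[:i] + w[i + 2:]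
--                     break
--             else:
--                 break
--         if w == "":
--             result += 1
--     return result
-- ===== Notes on version B (the rewrite author's own statement) =====
-- stated objective: alternative
-- what changed: Replaces the single-pass push/pop stack with iterated rewriting: each word is repeatedly scanned and the first adjacent equal pair deleted until a fixpoint; the word is good iff the fixpoint is empty (adjacent-pair cancellation is confluent).
import Mathlib
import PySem

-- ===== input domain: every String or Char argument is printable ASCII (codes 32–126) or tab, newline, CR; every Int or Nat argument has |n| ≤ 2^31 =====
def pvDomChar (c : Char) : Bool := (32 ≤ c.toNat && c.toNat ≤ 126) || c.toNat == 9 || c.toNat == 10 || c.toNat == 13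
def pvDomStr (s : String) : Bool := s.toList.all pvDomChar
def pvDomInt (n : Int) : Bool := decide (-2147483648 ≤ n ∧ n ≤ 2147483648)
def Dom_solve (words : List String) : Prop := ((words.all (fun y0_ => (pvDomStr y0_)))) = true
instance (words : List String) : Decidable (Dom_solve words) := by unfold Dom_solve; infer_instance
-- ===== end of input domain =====

-- B replaces A's one-pass stack with iterated deletion of the first adjacent equal
-- pair to a fixpoint (same values; an alternative algorithm, not claimed faster).

-- ===== PORT A =====
-- Python list used as a stack (append/pop/[-1] at the end) is ported with the top
-- of the stack at the HEAD of the Lean list.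
def solve (words : List String) : Int :=
  words.foldl (fun result word =>
    let stack := word.toList.foldl (fun stack alpha =>
      match stack with
      | top :: rest => if top = alpha then rest else alpha :: top :: rest
      | [] => [alpha]) []
    if stack = [] then result + 1 else result) 0

-- ===== PORT B =====
-- the inner index scan of Source B: find the first adjacent equal pair and delete it
def cancelOnce : List Char → Option (List Char)
  | a :: b :: t => if a = b then some t else (cancelOnce (b :: t)).map (a :: ·)
  | _ => none

theorem cancelOnce_length : ∀ w w', cancelOnce w = some w' → w'.length < w.length := by
  intro w
  induction w with
  | nil => intro w' h; simp [cancelOnce] at h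
  | cons a t ih =>
    intro w' h
    match t, h with
    | b :: t, h =>
      simp only [cancelOnce] at h
      split at h
      · cases h; simp
      · cases hc : cancelOnce (b :: t) with
        | none => rw [hc] at h; simp at h
        | some u =>
          rw [hc] at h; cases h
          have := ih u hc
          simpa using Nat.succ_lt_succ this

-- the 'while True' loop of Source B: rewrite to a fixpoint
def reduceFix (w : List Char) : List Char :=
  match hc : cancelOnce w with
  | none => w
  | some w' => reduceFix w'
termination_by w.length
decreasing_by exact cancelOnce_length _ _ hc

def solve_alt (words : List String) : Int :=
  words.foldl (fun result word =>
    if reduceFix word.toList = [] then result + 1 else result) 0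

-- ===== PRECONDITION & SPEC =====
def Spec_solve (words : List String) (out : Int) : Prop := out = solve_alt words
instance (words : List String) (out : Int) : Decidable (Spec_solve words out) := by unfold Spec_solve; infer_instance

-- ===== CLAIM (what is proved, stated in full; the proofs are below) =====
def Claim_equal_solve : Prop := ∀ (words : List String), Dom_solve words → Spec_solve words (solve words)

-- ===== LEMMAS AND PROOFS =====

def pvStep (stack : List Char) (alpha : Char) : List Char :=
  match stack with
  | top :: rest => if top = alpha then rest else alpha :: top :: rest
  | [] => [alpha]

def pvNorm (w : List Char) : List Char := w.foldl pvStep []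

-- reduced stacks: no two adjacent equal characters
def Red (st : List Char) : Prop := List.IsChain (· ≠ ·) st

theorem red_step {st : List Char} (h : Red st) (c : Char) : Red (pvStep st c) := by
  cases st with
  | nil => exact List.IsChain.singleton c
  | cons h' t =>
    simp only [pvStep]
    by_cases e : h' = c
    · rw [if_pos e]
      cases t with
      | nil => exact List.IsChain.nil
      | cons d t' => exact (List.isChain_cons_cons.mp h).2
    · rw [if_neg e]
      exact List.IsChain.cons_cons (fun e2 => e e2.symm) h

theorem step_step {st : List Char} (h : Red st) (c : Char) :
    pvStep (pvStep st c) c = st := by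
  cases st with
  | nil => simp [pvStep]
  | cons h' t =>
    by_cases e : h' = c
    · subst e
      cases t with
      | nil => simp [pvStep]
      | cons d t' =>
        have hd : h' ≠ d := (List.isChain_cons_cons.mp h).1
        simp [pvStep, Ne.symm hd]
    · simp [pvStep, e]

-- one cancellation step preserves the stack normal form
theorem cancel_norm : ∀ (w w' st : List Char), Red st → cancelOnce w = some w' →
    w.foldl pvStep st = w'.foldl pvStep st := by
  intro w
  induction w with
  | nil => intro w' st _ h; simp [cancelOnce] at h
  | cons a t ih =>
    intro w' st hst h
    match t, h with
    | b :: t, h =>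
      simp only [cancelOnce] at h
      split at h
      next e =>
        cases h
        simp only [List.foldl_cons]
        rw [← e, step_step hst]
      next e =>
        cases hc : cancelOnce (b :: t) with
        | none => rw [hc] at h; simp at h
        | some u =>
          rw [hc] at h; cases h
          show ((b :: t).foldl pvStep (pvStep st a)) = ((a :: u).foldl pvStep st)
          simp only [List.foldl_cons]
          exact ih u (pvStep st a) (red_step hst a) hc

-- at a fixpoint (no adjacent equal pair) the stack fold just reverses the word
theorem nocancel_fold : ∀ (w st : List Char), cancelOnce w = none →
    (∀ a t, w = a :: t → ∀ h s, st = h :: s → h ≠ a) →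
    w.foldl pvStep st = w.reverse ++ st := by
  intro w
  induction w with
  | nil => intro st _ _; simp
  | cons a t ih =>
    intro st hc hhd
    have hstep : pvStep st a = a :: st := by
      cases st with
      | nil => simp [pvStep]
      | cons h s =>
        have : h ≠ a := hhd a t rfl h s rfl
        simp [pvStep, this]
    cases t with
    | nil => simp [hstep]
    | cons b t' =>
      simp only [cancelOnce] at hc
      split at hc
      · simp at hc
      · have hc' : cancelOnce (b :: t') = none := by
          cases h2 : cancelOnce (b :: t') with
          | none => rfl
          | some u => rw [h2] at hc; simp at hc
        have := ih (a :: st) hc' (by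
          intro x tx hx hh ss hss
          cases hx; cases hss
          exact fun e => ‹¬ a = b› e)
        simp only [List.foldl_cons, hstep] at this ⊢
        rw [this]; simp

theorem reduceFix_norm : ∀ (w : List Char), pvNorm w = pvNorm (reduceFix w) := by
  intro w
  induction w using reduceFix.induct with
  | case1 w hc => rw [reduceFix, hc]
  | case2 w w' hc ih =>
    rw [reduceFix, hc]
    exact (cancel_norm w w' [] List.IsChain.nil hc).trans ih

theorem reduceFix_nocancel (w : List Char) : cancelOnce (reduceFix w) = none := by
  induction w using reduceFix.induct with
  | case1 w hc => rw [reduceFix, hc]; exact hc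
  | case2 w w' hc ih => rw [reduceFix, hc]; exact ih

theorem norm_empty_iff (w : List Char) : (pvNorm w = []) ↔ (reduceFix w = []) := by
  rw [reduceFix_norm w]
  have h := nocancel_fold (reduceFix w) [] (reduceFix_nocancel w) (by intro _ _ _ _ _ h; cases h)
  unfold pvNorm
  rw [h]
  simp

theorem solve_congr (words : List String) (acc : Int) :
    words.foldl (fun result word =>
      let stack := word.toList.foldl (fun stack alpha =>
        match stack with
        | top :: rest => if top = alpha then rest else alpha :: top :: rest
        | [] => [alpha]) []
      if stack = [] then result + 1 else result) acc
    = words.foldl (fun result word =>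
      if reduceFix word.toList = [] then result + 1 else result) acc := by
  induction words generalizing acc with
  | nil => rfl
  | cons w ws ih =>
    simp only [List.foldl_cons]
    have : (w.toList.foldl (fun stack alpha =>
        match stack with
        | top :: rest => if top = alpha then rest else alpha :: top :: rest
        | [] => [alpha]) [] = []) ↔ (reduceFix w.toList = []) := by
      have : (w.toList.foldl (fun stack alpha =>
          match stack with
          | top :: rest => if top = alpha then rest else alpha :: top :: rest
          | [] => [alpha]) []) = pvNorm w.toList := rfl
      rw [this]
      exact norm_empty_iff w.toList
    by_cases h : reduceFix w.toList = []
    · rw [if_pos h, if_pos (this.mpr h), ih]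
    · rw [if_neg h, if_neg (fun hh => h (this.mp hh)), ih]

-- ===== VERDICT (by name: the statement is the Claim_ definition above) =====
theorem solve_spec : Claim_equal_solve := by
  intro words _
  unfold Spec_solve solve solve_alt
  exact solve_congr words 0
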